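-- pv_equiv track=rewrite | github.com/JJayeee/Algorithm | CodingTest/coupang_03.py | solution
-- ===== SOURCE A (Python) =====
-- def solution(k, score):
--     length = len(score)
--     hack = {}
--     nums = {}
--
--     for i in range(1, length):
--         b = abs(score[i-1] - score[i])
--         if hack.get(b):
--             hack[b].append(i)
--             nums[b] += 1
--         else:
--             hack[b] = [i]
--             nums[b] = 1
--
--     visited = [0]*length
--     for key, val in nums.items():
--         if val >= k:
--             for v in hack[key]:
--                 if not visited[v]:
--                     length -= 1
--                     visited[v] = 1
--                 if not visited[v-1]:
--                     visited[v-1] = 1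
--                     length -= 1
--
--     return length
-- ===== SOURCE B (Python) =====
-- def solution(k, score):
--     n = len(score)
--     diffs = [abs(score[t] - score[t + 1]) for t in range(n - 1)]
--     cnt = {}
--     for d in diffs:
--         cnt[d] = cnt.get(d, 0) + 1
--     removed = 0
--     for j in range(n):
--         if (j >= 1 and cnt[diffs[j - 1]] >= k) or (j <= n - 2 and cnt[diffs[j]] >= k):
--             removed += 1
--     return n - removed
-- ===== Notes on version B (the rewrite author's own statement) =====
-- stated objective: simpler
-- what changed: B replaces A's dict-of-index-lists plus visited-array group marking by a single adjacent-difference array with a count dict and one index-centric pass that tests each index's two incident edges, removing the hack lists and the visited array entirely.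
import Mathlib
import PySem

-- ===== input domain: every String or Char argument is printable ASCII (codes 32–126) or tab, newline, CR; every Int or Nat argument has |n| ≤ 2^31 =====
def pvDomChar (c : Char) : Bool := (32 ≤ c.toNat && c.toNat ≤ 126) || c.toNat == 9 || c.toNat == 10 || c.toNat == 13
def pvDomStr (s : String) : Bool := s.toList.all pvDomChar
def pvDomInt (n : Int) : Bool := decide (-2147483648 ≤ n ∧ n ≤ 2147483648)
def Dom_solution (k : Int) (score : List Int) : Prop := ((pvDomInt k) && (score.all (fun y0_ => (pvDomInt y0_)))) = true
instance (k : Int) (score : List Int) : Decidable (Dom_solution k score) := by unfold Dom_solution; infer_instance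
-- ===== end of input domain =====

-- B recomputes A's result index-centrically: one diff array + one counting dict, then each index
-- is counted out iff one of its incident adjacent-difference edges belongs to a group of size ≥ k.

-- ===== PORT A =====
-- one step of A's first loop: b = |score[i-1]-score[i]|; grow hack/nums at key b
def solStep1 (score : List Int)
    (s : PySem.Dict Int (List Int) × PySem.Dict Int Int) (i : Int) :
    PySem.Dict Int (List Int) × PySem.Dict Int Int :=
  let b := |PySem.List.pyGetD score (i - 1) 0 - PySem.List.pyGetD score i 0|
  if ((s.1.get? b).getD []).isEmpty = false then
    (s.1.modify b [] (· ++ [i]), s.2.modify b 0 (· + 1))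
  else
    (s.1.insert b [i], s.2.insert b 1)

-- A's inner marking: mark v then v-1 in visited, decrementing length for each fresh mark
def solMark (s : List Int × Int) (v : Int) : List Int × Int :=
  let s1 : List Int × Int :=
    if PySem.List.pyGetD s.1 v 0 = 0 then (PySem.List.pySetD s.1 v 1, s.2 - 1) else s
  if PySem.List.pyGetD s1.1 (v - 1) 0 = 0 then (PySem.List.pySetD s1.1 (v - 1) 1, s1.2 - 1) else s1

def solution (k : Int) (score : List Int) : Int :=
  let length : Int := score.length
  let hn := (PySem.List.pyRange 1 length 1).foldl (solStep1 score)
      (PySem.Dict.empty, PySem.Dict.empty)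
  let visited : List Int := List.replicate score.length 0
  let fin := hn.2.items.foldl
      (fun (s : List Int × Int) kv =>
        if kv.2 ≥ k then (hn.1.getD kv.1 []).foldl solMark s else s)
      (visited, length)
  fin.2

-- ===== PORT B =====
def solution_alt (k : Int) (score : List Int) : Int :=
  let n : Int := score.length
  let diffs := (PySem.List.pyRange 0 (n - 1) 1).map
      (fun t => |PySem.List.pyGetD score t 0 - PySem.List.pyGetD score (t + 1) 0|)
  let cnt := diffs.foldl
      (fun (d : PySem.Dict Int Int) x => d.insert x (d.getD x 0 + 1)) PySem.Dict.empty
  let removed := (PySem.List.pyRange 0 n 1).foldl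
      (fun acc j =>
        if (1 ≤ j ∧ k ≤ cnt.getD (PySem.List.pyGetD diffs (j - 1) 0) 0)
            ∨ (j ≤ n - 2 ∧ k ≤ cnt.getD (PySem.List.pyGetD diffs j 0) 0)
        then acc + 1 else acc) 0
  n - removed

-- ===== PRECONDITION & SPEC =====
def Spec_solution (k : Int) (score : List Int) (out : Int) : Prop := out = solution_alt k score
instance (k : Int) (score : List Int) (out : Int) : Decidable (Spec_solution k score out) := by unfold Spec_solution; infer_instance

-- ===== CLAIM (what is proved, stated in full; the proofs are below) =====
def Claim_equal_solution : Prop := ∀ (k : Int) (score : List Int), Dom_solution k score → Spec_solution k score (solution k score)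


-- ===== LEMMAS AND PROOFS =====

-- the adjacent-difference list both programs are about
def pdiffs (score : List Int) : List Int :=
  (List.range (score.length - 1)).map (fun t => |score.getD t 0 - score.getD (t + 1) 0|)

-- indices s < t whose difference equals c (A stores s+1 in hack[c])
def Fidx (d : List Int) (t : Nat) (c : Int) : List Nat :=
  (List.range t).filter (fun s => decide (d.getD s 0 = c))

-- the visited array determined by a marking predicate
def Vv (n : Nat) (p : Nat → Bool) : List Int :=
  (List.range n).map (fun j => if p j then 1 else 0)

-- number of marked indices
def cP (n : Nat) (p : Nat → Bool) : Int := ((List.range n).countP p : Int)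

lemma length_pdiffs (score : List Int) : (pdiffs score).length = score.length - 1 := by
  simp [pdiffs]

lemma pdiffs_getD (score : List Int) (t : Nat) (ht : t < score.length - 1) :
    (pdiffs score).getD t 0 = |score.getD t 0 - score.getD (t + 1) 0| := by
  rw [List.getD_eq_getElem _ _ (by simpa [pdiffs] using ht)]
  simp [pdiffs]

lemma map_getD_self (l : List Int) :
    (List.range l.length).map (fun s => l.getD s 0) = l := by
  apply List.ext_getElem
  · simp
  intro i h1 h2
  simp [List.getD_eq_getElem?_getD, List.getElem?_eq_getElem h2]

lemma mem_Fidx (d : List Int) (t : Nat) (c : Int) (s : Nat) :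
    s ∈ Fidx d t c ↔ s < t ∧ d.getD s 0 = c := by
  simp [Fidx]

lemma Fidx_succ (d : List Int) (t : Nat) (c : Int) :
    Fidx d (t + 1) c = Fidx d t c ++ (if d.getD t 0 = c then [t] else []) := by
  simp [Fidx, List.range_succ, List.filter_append]
  split_ifs <;> simp_all

lemma Fidx_length_count (l : List Int) (c : Int) :
    (Fidx l l.length c).length = l.count c := by
  rw [Fidx, ← List.countP_eq_length_filter, List.count]
  conv_rhs => rw [← map_getD_self l]
  rw [List.countP_map]
  apply List.countP_congr
  intro s hs
  simp

lemma pyRange_one_natCast (n : Nat) :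
    PySem.List.pyRange 1 (n : Int) = (List.range (n - 1)).map (fun t : Nat => (t : Int) + 1) := by
  induction n with
  | zero => rfl
  | succ m ih =>
    cases m with
    | zero => rfl
    | succ m' =>
      have h1 : ((m' + 1 + 1 : Nat) : Int) = ((m' + 1 : Nat) : Int) + 1 := by push_cast; ring
      rw [h1, PySem.List.pyRange_one_succ_right (by push_cast; omega), ih]
      rw [show (m' + 1 + 1) - 1 = (m' + 1 - 1) + 1 by omega, List.range_succ, List.map_append]
      simp

lemma ofList_append_singleton {α : Type} [BEq α] (l : List α) (b : α) :
    PySem.Set.ofList (l ++ [b]) = PySem.Set.add (PySem.Set.ofList l) b := by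
  rw [PySem.Set.ofList_eq_foldl, PySem.Set.ofList_eq_foldl, List.foldl_append]
  rfl

lemma Vv_pyGetD (n : Nat) (p : Nat → Bool) (j : Nat) (hj : j < n) :
    PySem.List.pyGetD (Vv n p) (j : Int) 0 = if p j then 1 else 0 := by
  rw [PySem.List.pyGetD_natCast]
  rw [List.getD_eq_getElem _ _ (by simpa [Vv] using hj)]
  simp [Vv]

lemma Vv_set (n : Nat) (p : Nat → Bool) (j : Nat) :
    (Vv n p).set j 1 = Vv n (fun x => if x = j then true else p x) := by
  apply List.ext_getElem
  · simp [Vv]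
  intro i h1 h2
  simp [Vv, List.getElem_set]
  split_ifs <;> simp_all

lemma Vv_false (n : Nat) : Vv n (fun _ => false) = List.replicate n 0 := by
  simp [Vv]

lemma cP_false (n : Nat) : cP n (fun _ => false) = 0 := by
  simp [cP]

lemma cP_upd (n : Nat) (p : Nat → Bool) (j : Nat) (hj : j < n) (hp : p j = false) :
    cP n (fun x => if x = j then true else p x) = cP n p + 1 := by
  unfold cP
  induction n with
  | zero => omega
  | succ m ih =>
    rw [List.range_succ, List.countP_append, List.countP_append]
    by_cases hjm : j = m
    · subst hjm
      have hcong : (List.range j).countP (fun x => if x = j then true else p x)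
          = (List.range j).countP p :=
        List.countP_congr (by
          intro x hx
          have := List.mem_range.mp hx
          simp [show ¬ (x = j) by omega])
      rw [hcong]
      simp [hp]
    · have := ih (by omega)
      have hsing : List.countP (fun x => if x = j then true else p x) [m] = List.countP p [m] := by
        simp [show ¬ (m = j) by omega]
      rw [hsing]
      push_cast at this ⊢
      omega

lemma upd_of_true (p : Nat → Bool) (j : Nat) (hp : p j = true) :
    (fun x => if x = j then true else p x) = p := by
  funext x
  by_cases hx : x = j <;> simp [hx, hp]

lemma solMark_spec (n : Nat) (p : Nat → Bool) (s : Nat) (hs : s + 1 < n) :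
    solMark (Vv n p, (n : Int) - cP n p) ((s : Int) + 1)
      = (Vv n (fun j => p j || (decide (j = s) || decide (j = s + 1))),
         (n : Int) - cP n (fun j => p j || (decide (j = s) || decide (j = s + 1)))) := by
  have hc1 : ((s : Int) + 1) = ((s + 1 : Nat) : Int) := by push_cast; ring
  have hs' : s < n := by omega
  have hq2t : (fun x => if x = s then true else (fun y => if y = s + 1 then true else p y) x)
      = (fun j => p j || (decide (j = s) || decide (j = s + 1))) := by
    funext x
    by_cases h1 : x = s
    · simp [h1]
    · by_cases h2 : x = s + 1 <;> simp [h1, h2]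
  have hstep1 : (if PySem.List.pyGetD (Vv n p) ((s : Int) + 1) 0 = 0
      then (PySem.List.pySetD (Vv n p) ((s : Int) + 1) 1, ((n : Int) - cP n p) - 1)
      else (Vv n p, (n : Int) - cP n p))
      = (Vv n (fun y => if y = s + 1 then true else p y),
         (n : Int) - cP n (fun y => if y = s + 1 then true else p y)) := by
    rw [hc1, Vv_pyGetD n p (s + 1) hs]
    by_cases hp : p (s + 1)
    · rw [if_neg (by simp [hp]), upd_of_true p (s + 1) hp]
    · rw [if_pos (by simp [hp]), PySem.List.pySetD_natCast, Vv_set,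
        cP_upd n p (s + 1) hs (by simpa using hp)]
      ring_nf
  have hstep2 : ∀ q : Nat → Bool, (if PySem.List.pyGetD (Vv n q) (((s : Int) + 1) - 1) 0 = 0
      then (PySem.List.pySetD (Vv n q) (((s : Int) + 1) - 1) 1, ((n : Int) - cP n q) - 1)
      else (Vv n q, (n : Int) - cP n q))
      = (Vv n (fun y => if y = s then true else q y),
         (n : Int) - cP n (fun y => if y = s then true else q y)) := by
    intro q
    have hc2 : ((s : Int) + 1) - 1 = ((s : Nat) : Int) := by ring
    rw [hc2, Vv_pyGetD n q s hs']
    by_cases hq : q s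
    · rw [if_neg (by simp [hq]), upd_of_true q s hq]
    · rw [if_pos (by simp [hq]), PySem.List.pySetD_natCast, Vv_set,
        cP_upd n q s hs' (by simpa using hq)]
      ring_nf
  simp only [solMark]
  rw [hstep1, hstep2, hq2t]

lemma foldl_solMark (n : Nat) (ss : List Nat) (hss : ∀ s ∈ ss, s + 1 < n) (p : Nat → Bool) :
    (ss.map (fun s : Nat => (s : Int) + 1)).foldl solMark (Vv n p, (n : Int) - cP n p)
      = (Vv n (fun j => p j || ss.any (fun s => decide (j = s) || decide (j = s + 1))),
         (n : Int) - cP n (fun j => p j || ss.any (fun s => decide (j = s) || decide (j = s + 1)))) := by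
  induction ss generalizing p with
  | nil => simp
  | cons s ss ih =>
    rw [List.map_cons, List.foldl_cons, solMark_spec n p s (hss s (by simp)),
      ih (fun x hx => hss x (by simp [hx]))]
    have hfun : (fun j => (p j || (decide (j = s) || decide (j = s + 1)))
          || ss.any (fun s' => decide (j = s') || decide (j = s' + 1)))
        = (fun j => p j || (s :: ss).any (fun s' => decide (j = s') || decide (j = s' + 1))) := by
      funext j
      simp [List.any_cons, Bool.or_assoc]
    rw [hfun]

lemma outer_fold (n : Nat) (k : Int) (g : Int → List Nat) (hg : ∀ c, ∀ s ∈ g c, s + 1 < n)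
    (cs : List Int) (p : Nat → Bool) :
    (cs.map (fun c => (c, ((g c).length : Int)))).foldl
        (fun s kv => if kv.2 ≥ k then ((g kv.1).map (fun s : Nat => (s : Int) + 1)).foldl solMark s else s)
        (Vv n p, (n : Int) - cP n p)
      = (Vv n (fun j => p j || cs.any (fun c =>
            decide (k ≤ ((g c).length : Int)) && (g c).any (fun s => decide (j = s) || decide (j = s + 1)))),
         (n : Int) - cP n (fun j => p j || cs.any (fun c =>
            decide (k ≤ ((g c).length : Int)) && (g c).any (fun s => decide (j = s) || decide (j = s + 1))))) := by
  induction cs generalizing p with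
  | nil => simp
  | cons c cs ih =>
    rw [List.map_cons, List.foldl_cons]
    simp only [ge_iff_le]
    by_cases hk : k ≤ ((g c).length : Int)
    · rw [if_pos hk, foldl_solMark n (g c) (hg c) p, ih]
      have hfun : (fun j => (p j || (g c).any (fun s => decide (j = s) || decide (j = s + 1)))
            || cs.any (fun c' => decide (k ≤ ((g c').length : Int)) && (g c').any (fun s => decide (j = s) || decide (j = s + 1))))
          = (fun j => p j || (c :: cs).any (fun c' => decide (k ≤ ((g c').length : Int)) && (g c').any (fun s => decide (j = s) || decide (j = s + 1)))) := by
        funext j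
        simp [List.any_cons, hk, Bool.or_assoc]
      rw [hfun]
    · rw [if_neg hk, ih]
      have hfun : (fun j => p j
            || cs.any (fun c' => decide (k ≤ ((g c').length : Int)) && (g c').any (fun s => decide (j = s) || decide (j = s + 1))))
          = (fun j => p j || (c :: cs).any (fun c' => decide (k ≤ ((g c').length : Int)) && (g c').any (fun s => decide (j = s) || decide (j = s + 1)))) := by
        funext j
        simp [List.any_cons, hk]
      rw [hfun]

-- A's first loop after t steps
def loopA (score : List Int) (t : Nat) : PySem.Dict Int (List Int) × PySem.Dict Int Int :=
  ((List.range t).map (fun u : Nat => (u : Int) + 1)).foldl (solStep1 score)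
    (PySem.Dict.empty, PySem.Dict.empty)

lemma set_add_of_mem {α : Type} [BEq α] [LawfulBEq α] {l : List α} {b : α} (h : b ∈ l) :
    PySem.Set.add l b = l := by
  simp [PySem.Set.add, PySem.Set.contains, h]

lemma set_add_of_not_mem {α : Type} [BEq α] [LawfulBEq α] {l : List α} {b : α} (h : b ∉ l) :
    PySem.Set.add l b = l ++ [b] := by
  simp [PySem.Set.add, PySem.Set.contains, h]

lemma Fidx_nil_iff (d : List Int) (t : Nat) (c : Int) :
    Fidx d t c = [] ↔ c ∉ (List.range t).map (fun s => d.getD s 0) := by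
  constructor
  · intro h hc
    obtain ⟨s, hs, hsc⟩ := List.mem_map.mp hc
    have hmem : s ∈ Fidx d t c := (mem_Fidx d t c s).mpr ⟨List.mem_range.mp hs, hsc⟩
    rw [h] at hmem
    exact List.not_mem_nil hmem
  · intro h
    by_contra hne
    obtain ⟨s, hmem⟩ := List.exists_mem_of_ne_nil _ hne
    obtain ⟨hst, hsc⟩ := (mem_Fidx d t c s).mp hmem
    exact h (List.mem_map.mpr ⟨s, List.mem_range.mpr hst, hsc⟩)

-- first-loop invariant: hack groups edge indices by difference, nums counts them,
-- nums' keys are the distinct differences in first-occurrence order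
lemma loop1 (score : List Int) (t : Nat) (ht : t ≤ score.length - 1) :
    (∀ c, (loopA score t).1.getD c [] = (Fidx (pdiffs score) t c).map (fun s : Nat => (s : Int) + 1)) ∧
    (∀ c, (loopA score t).2.getD c 0 = ((Fidx (pdiffs score) t c).length : Int)) ∧
    (loopA score t).2.keys = PySem.Set.ofList ((List.range t).map (fun s => (pdiffs score).getD s 0)) ∧
    (loopA score t).2.keys.Nodup := by
  induction t with
  | zero =>
    refine ⟨?_, ?_, ?_, ?_⟩ <;>
      simp [loopA, Fidx, PySem.Dict.getD_empty, PySem.Dict.keys_empty, PySem.Set.ofList]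
  | succ t ih =>
    obtain ⟨h1, h2, h3, h4⟩ := ih (by omega)
    have hstep : loopA score (t + 1) = solStep1 score (loopA score t) ((t : Int) + 1) := by
      rw [loopA, loopA, List.range_succ, List.map_append, List.foldl_append]
      rfl
    have hb : |PySem.List.pyGetD score (((t : Int) + 1) - 1) 0 - PySem.List.pyGetD score ((t : Int) + 1) 0|
        = (pdiffs score).getD t 0 := by
      rw [show ((t : Int) + 1) - 1 = ((t : Nat) : Int) by ring,
        show ((t : Int) + 1) = ((t + 1 : Nat) : Int) by push_cast; ring,
        PySem.List.pyGetD_natCast, PySem.List.pyGetD_natCast, pdiffs_getD score t (by omega)]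
    rw [hstep]
    simp only [solStep1]
    rw [hb, ← PySem.Dict.getD_eq_get?_getD, h1 ((pdiffs score).getD t 0)]
    have hmem : (pdiffs score).getD t 0 ∈ (List.range t).map (fun s => (pdiffs score).getD s 0)
        ↔ Fidx (pdiffs score) t ((pdiffs score).getD t 0) ≠ [] := by
      have := Fidx_nil_iff (pdiffs score) t ((pdiffs score).getD t 0)
      tauto
    by_cases hFb : Fidx (pdiffs score) t ((pdiffs score).getD t 0) = []
    · -- fresh difference: insert branch
      rw [hFb]
      rw [if_neg (by simp)]
      have hnotmem : (pdiffs score).getD t 0 ∉ (List.range t).map (fun s => (pdiffs score).getD s 0) := by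
        rw [← Fidx_nil_iff]; exact hFb
      have hcont : (loopA score t).2.contains ((pdiffs score).getD t 0) = false := by
        rw [← Bool.not_eq_true, PySem.Dict.contains_iff_mem_keys, h3, PySem.Set.mem_ofList]
        exact hnotmem
      refine ⟨?_, ?_, ?_, ?_⟩
      · intro c
        rw [PySem.Dict.getD_insert]
        by_cases hc : c = (pdiffs score).getD t 0
        · rw [if_pos hc, hc, Fidx_succ, hFb, if_pos rfl]
          simp
        · rw [if_neg hc, Fidx_succ, if_neg (fun h => hc h.symm), List.append_nil, h1 c]
      · intro c
        rw [PySem.Dict.getD_insert]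
        by_cases hc : c = (pdiffs score).getD t 0
        · rw [if_pos hc, hc, Fidx_succ, hFb, if_pos rfl]
          simp
        · rw [if_neg hc, Fidx_succ, if_neg (fun h => hc h.symm), List.append_nil, h2 c]
      · rw [PySem.Dict.keys_insert_of_not_contains _ _ hcont, h3, List.range_succ,
          List.map_append]
        simp only [List.map_cons, List.map_nil]
        rw [ofList_append_singleton,
          set_add_of_not_mem (fun hc => hnotmem ((PySem.Set.mem_ofList _ _).mp hc))]
      · exact PySem.Dict.nodup_keys_insert _ _ _ h4
    · -- already-seen difference: modify branch
      rw [if_pos (by simp only [List.isEmpty_map, List.isEmpty_eq_false_iff, ne_eq]; exact hFb)]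
      have hmem' : (pdiffs score).getD t 0 ∈ (loopA score t).2.keys := by
        rw [h3, PySem.Set.mem_ofList]
        exact hmem.mpr hFb
      have hcont : (loopA score t).2.contains ((pdiffs score).getD t 0) = true :=
        (PySem.Dict.contains_iff_mem_keys _ _).mpr hmem'
      refine ⟨?_, ?_, ?_, ?_⟩
      · intro c
        rw [PySem.Dict.getD_modify]
        by_cases hc : c = (pdiffs score).getD t 0
        · rw [if_pos hc, hc, Fidx_succ, if_pos rfl, h1, List.map_append]
          simp
        · rw [if_neg hc, Fidx_succ, if_neg (fun h => hc h.symm), List.append_nil, h1 c]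
      · intro c
        rw [PySem.Dict.getD_modify]
        by_cases hc : c = (pdiffs score).getD t 0
        · rw [if_pos hc, hc, Fidx_succ, if_pos rfl, h2, List.length_append]
          push_cast
          simp
        · rw [if_neg hc, Fidx_succ, if_neg (fun h => hc h.symm), List.append_nil, h2 c]
      · rw [PySem.Dict.keys_modify, PySem.Dict.keys_insert_of_contains _ _ hcont, h3,
          List.range_succ, List.map_append]
        simp only [List.map_cons, List.map_nil]
        rw [ofList_append_singleton,
          set_add_of_mem ((PySem.Set.mem_ofList _ _).mpr (hmem.mpr hFb))]
      · rw [PySem.Dict.keys_modify]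
        exact PySem.Dict.nodup_keys_insert _ _ _ h4

lemma solution_eq (k : Int) (score : List Int) :
    solution k score = (score.length : Int) - cP score.length (fun j =>
      (PySem.Set.ofList (pdiffs score)).any (fun c =>
        decide (k ≤ ((Fidx (pdiffs score) (score.length - 1) c).length : Int)) &&
        (Fidx (pdiffs score) (score.length - 1) c).any (fun s => decide (j = s) || decide (j = s + 1)))) := by
  obtain ⟨h1, h2, h3, h4⟩ := loop1 score (score.length - 1) (le_refl _)
  have hL : (List.range (score.length - 1)).map (fun s => (pdiffs score).getD s 0) = pdiffs score := by
    conv_rhs => rw [← map_getD_self (pdiffs score)]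
    rw [length_pdiffs]
  have hg : ∀ c, ∀ s ∈ Fidx (pdiffs score) (score.length - 1) c, s + 1 < score.length := by
    intro c s hs
    have := (mem_Fidx _ _ _ _).mp hs
    omega
  simp only [solution]
  rw [pyRange_one_natCast]
  rw [show List.foldl (solStep1 score) (PySem.Dict.empty, PySem.Dict.empty)
      (List.map (fun t : Nat => (t : Int) + 1) (List.range (score.length - 1)))
      = loopA score (score.length - 1) from rfl]
  rw [PySem.Dict.items_eq_map_keys _ h4 0, h3, hL]
  have hitems : (PySem.Set.ofList (pdiffs score)).map
        (fun c => (c, (loopA score (score.length - 1)).2.getD c 0))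
      = (PySem.Set.ofList (pdiffs score)).map
        (fun c => (c, ((Fidx (pdiffs score) (score.length - 1) c).length : Int))) :=
    List.map_congr_left (fun c _ => by rw [h2])
  rw [hitems]
  have hbody : (fun (s : List Int × Int) (kv : Int × Int) =>
        if kv.2 ≥ k then ((loopA score (score.length - 1)).1.getD kv.1 []).foldl solMark s else s)
      = (fun (s : List Int × Int) (kv : Int × Int) =>
        if kv.2 ≥ k then ((Fidx (pdiffs score) (score.length - 1) kv.1).map
          (fun s : Nat => (s : Int) + 1)).foldl solMark s else s) := by
    funext s kv
    rw [h1]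
  rw [hbody]
  rw [show (List.replicate score.length (0 : Int)) = Vv score.length (fun _ => false) from
    (Vv_false score.length).symm]
  rw [show ((score.length : Nat) : Int) = (score.length : Int) - cP score.length (fun _ => false) from
    by rw [cP_false]; ring]
  rw [outer_fold score.length k (fun c => Fidx (pdiffs score) (score.length - 1) c) hg
    (PySem.Set.ofList (pdiffs score)) (fun _ => false)]
  have hfalse : (fun j => (false : Bool) || (PySem.Set.ofList (pdiffs score)).any (fun c =>
        decide (k ≤ ((Fidx (pdiffs score) (score.length - 1) c).length : Int)) &&
        (Fidx (pdiffs score) (score.length - 1) c).any (fun s => decide (j = s) || decide (j = s + 1))))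
      = (fun j => (PySem.Set.ofList (pdiffs score)).any (fun c =>
        decide (k ≤ ((Fidx (pdiffs score) (score.length - 1) c).length : Int)) &&
        (Fidx (pdiffs score) (score.length - 1) c).any (fun s => decide (j = s) || decide (j = s + 1)))) := by
    funext j
    simp
  rw [hfalse]
  simp only [cP_false, sub_zero]

lemma solution_alt_eq (k : Int) (score : List Int) :
    solution_alt k score = (score.length : Int) - cP score.length (fun j =>
      decide ((1 ≤ (j : Int) ∧ k ≤ (((pdiffs score).count (PySem.List.pyGetD (pdiffs score) ((j : Int) - 1) 0)) : Int))
        ∨ ((j : Int) ≤ (score.length : Int) - 2 ∧ k ≤ (((pdiffs score).count (PySem.List.pyGetD (pdiffs score) (j : Int) 0)) : Int)))) := by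
  have hdiffs : (PySem.List.pyRange 0 ((score.length : Int) - 1)).map
      (fun t => |PySem.List.pyGetD score t 0 - PySem.List.pyGetD score (t + 1) 0|) = pdiffs score := by
    rcases Nat.eq_zero_or_pos score.length with h0 | hpos
    · rw [pdiffs, h0]
      rfl
    · rw [show ((score.length : Int) - 1) = ((score.length - 1 : Nat) : Int) by omega,
        PySem.List.pyRange_zero_natCast, List.map_map, pdiffs]
      apply List.map_congr_left
      intro t _
      simp only [Function.comp_apply]
      rw [show ((t : Int) + 1) = ((t + 1 : Nat) : Int) by push_cast; ring,
        PySem.List.pyGetD_natCast, PySem.List.pyGetD_natCast]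
  simp only [solution_alt]
  rw [hdiffs]
  simp only [PySem.Dict.getD_foldl_insert_add_one, PySem.Dict.getD_empty, zero_add]
  rw [PySem.List.pyRange_zero_natCast, List.foldl_map, PySem.List.foldl_ite_add_one, zero_add, cP]

lemma pred_agree (k : Int) (score : List Int) (j : Nat) (hj : j < score.length) :
    ((PySem.Set.ofList (pdiffs score)).any (fun c =>
        decide (k ≤ ((Fidx (pdiffs score) (score.length - 1) c).length : Int)) &&
        (Fidx (pdiffs score) (score.length - 1) c).any (fun s => decide (j = s) || decide (j = s + 1))))
    = decide ((1 ≤ (j : Int) ∧ k ≤ (((pdiffs score).count (PySem.List.pyGetD (pdiffs score) ((j : Int) - 1) 0)) : Int))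
        ∨ ((j : Int) ≤ (score.length : Int) - 2 ∧ k ≤ (((pdiffs score).count (PySem.List.pyGetD (pdiffs score) (j : Int) 0)) : Int))) := by
  have hlen : (pdiffs score).length = score.length - 1 := length_pdiffs score
  rw [show score.length - 1 = (pdiffs score).length from hlen.symm, Bool.eq_iff_iff]
  simp only [List.any_eq_true, Bool.and_eq_true, Bool.or_eq_true, decide_eq_true_eq,
    PySem.Set.mem_ofList, mem_Fidx, Fidx_length_count]
  constructor
  · rintro ⟨c, hcd, hk, s, ⟨hsm, hsc⟩, hjs | hjs⟩
    · right
      refine ⟨by omega, ?_⟩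
      rw [show ((j : Nat) : Int) = ((s : Nat) : Int) by omega, PySem.List.pyGetD_natCast,
        hsc]
      exact hk
    · left
      refine ⟨by omega, ?_⟩
      rw [show ((j : Nat) : Int) - 1 = ((s : Nat) : Int) by omega, PySem.List.pyGetD_natCast,
        hsc]
      exact hk
  · rintro (⟨h1, hk⟩ | ⟨h2, hk⟩)
    · have hj1 : 1 ≤ j := by omega
      have hs : j - 1 < (pdiffs score).length := by omega
      rw [show ((j : Nat) : Int) - 1 = ((j - 1 : Nat) : Int) by omega,
        PySem.List.pyGetD_natCast] at hk
      refine ⟨(pdiffs score).getD (j - 1) 0, ?_, hk, j - 1, ⟨hs, rfl⟩, Or.inr (by omega)⟩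
      rw [List.getD_eq_getElem _ _ hs]
      exact List.getElem_mem _
    · have hs : j < (pdiffs score).length := by omega
      rw [PySem.List.pyGetD_natCast] at hk
      refine ⟨(pdiffs score).getD j 0, ?_, hk, j, ⟨hs, rfl⟩, Or.inl rfl⟩
      rw [List.getD_eq_getElem _ _ hs]
      exact List.getElem_mem _

-- ===== VERDICT (by name: the statement is the Claim_ definition above) =====
theorem solution_spec : Claim_equal_solution := by
  intro k score _
  unfold Spec_solution
  rw [solution_eq, solution_alt_eq]
  unfold cP
  congr 2
  exact List.countP_congr (fun j hj => by rw [pred_agree k score j (List.mem_range.mp hj)])
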